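-- pv_equiv track=rewrite | github.com/rsw0/reactemg_private | reactemg/private/paper_diagrams_generator/transparent_emg_video.py | extract_maintenance_windows
-- ===== SOURCE A (Python) =====
-- def extract_maintenance_windows(actions, buffer_windows):
--     """
--     Creates maintenance windows from buffer windows.
--     Each maintenance window is from end of buffer i to start of buffer i+1.
--     """
--     if not buffer_windows:
--         return [(0, len(actions))]
--
--     maintenance_windows = []
--     for i in range(len(buffer_windows) - 1):
--         start = buffer_windows[i][1]  # End of buffer i
--         end = buffer_windows[i + 1][0]  # Start of buffer i+1
--         maintenance_windows.append((start, end))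
--
--     # Last maintenance window goes from end of last buffer to end of the entire sequence
--     maintenance_windows.append((buffer_windows[-1][1], len(actions)))
--     return maintenance_windows
-- ===== SOURCE B (Python) =====
-- def extract_maintenance_windows(actions, buffer_windows):
--     """Single backward pass: walk the buffer windows from last to first,
--     carrying the start of the next window (initially the sequence end),
--     emitting windows back-to-front, then reverse once."""
--     out = []
--     nxt = len(actions)
--     for w in reversed(buffer_windows):
--         out.append((w[1], nxt))
--         nxt = w[0]
--     if not out:
--         return [(0, len(actions))]
--     out.reverse()
--     return out
-- ===== Notes on version B (the rewrite author's own statement) =====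
-- stated objective: alternative
-- what changed: Replaces A's forward indexed pairwise loop plus a separately appended last window with a single backward pass that carries the next window's start as an accumulator, builds the result back-to-front and reverses it once (no indexing, no special-cased last window).
import Mathlib
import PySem

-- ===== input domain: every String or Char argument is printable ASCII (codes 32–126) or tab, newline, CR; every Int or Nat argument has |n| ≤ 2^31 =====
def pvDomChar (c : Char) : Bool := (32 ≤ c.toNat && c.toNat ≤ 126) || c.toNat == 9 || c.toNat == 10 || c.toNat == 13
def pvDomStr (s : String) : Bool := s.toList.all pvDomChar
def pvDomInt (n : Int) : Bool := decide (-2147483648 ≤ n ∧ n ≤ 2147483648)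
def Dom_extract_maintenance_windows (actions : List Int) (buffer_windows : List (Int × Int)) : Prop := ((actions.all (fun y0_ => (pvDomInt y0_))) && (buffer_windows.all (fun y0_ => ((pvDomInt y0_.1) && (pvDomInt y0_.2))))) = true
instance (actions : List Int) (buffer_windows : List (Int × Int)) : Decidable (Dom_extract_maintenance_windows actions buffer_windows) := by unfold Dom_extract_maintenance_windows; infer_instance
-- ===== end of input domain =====

-- ===== PORT A =====
-- B differs from A by decomposition: one backward pass carrying the next window's start, built back-to-front and reversed, instead of A's forward indexed pairwise loop plus an appended last window.
def extract_maintenance_windows (actions : List Int) (buffer_windows : List (Int × Int)) : List (Int × Int) :=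
  if buffer_windows = [] then [(0, (actions.length : Int))]
  else
    let maintenance_windows :=
      (PySem.List.pyRange 0 ((buffer_windows.length : Int) - 1) 1).foldl
        (fun acc i =>
          let start := (PySem.List.pyGetD buffer_windows i (0, 0)).2
          let «end» := (PySem.List.pyGetD buffer_windows (i + 1) (0, 0)).1
          acc ++ [(start, «end»)]) []
    maintenance_windows ++ [((PySem.List.pyGetD buffer_windows (-1) (0, 0)).2, (actions.length : Int))]

-- ===== PORT B =====
def extract_maintenance_windows_alt (actions : List Int) (buffer_windows : List (Int × Int)) : List (Int × Int) :=
  let s := buffer_windows.reverse.foldl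
    (fun (p : List (Int × Int) × Int) w => (p.1 ++ [(w.2, p.2)], w.1))
    ([], (actions.length : Int))
  if s.1 = [] then [(0, (actions.length : Int))]
  else s.1.reverse

-- ===== PRECONDITION & SPEC =====
def Spec_extract_maintenance_windows (actions : List Int) (buffer_windows : List (Int × Int)) (out : List (Int × Int)) : Prop := out = extract_maintenance_windows_alt actions buffer_windows
instance (actions : List Int) (buffer_windows : List (Int × Int)) (out : List (Int × Int)) : Decidable (Spec_extract_maintenance_windows actions buffer_windows out) := by unfold Spec_extract_maintenance_windows; infer_instance

-- ===== CLAIM (what is proved, stated in full; the proofs are below) =====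
def Claim_equal_extract_maintenance_windows : Prop := ∀ (actions : List Int) (buffer_windows : List (Int × Int)), Dom_extract_maintenance_windows actions buffer_windows → Spec_extract_maintenance_windows actions buffer_windows (extract_maintenance_windows actions buffer_windows)

-- ===== LEMMAS AND PROOFS =====

-- Reference recursive form: the maintenance windows for head w, remaining windows l, sequence end n.
def pvW (n : Int) : (Int × Int) → List (Int × Int) → List (Int × Int)
  | w, [] => [(w.2, n)]
  | w, y :: r => (w.2, y.1) :: pvW n y r

lemma pvW_ne_nil (n : Int) (w : Int × Int) (l : List (Int × Int)) : pvW n w l ≠ [] := by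
  cases l <;> simp [pvW]

-- A's indexed pairwise windows (plus the final window) equal the reference form.
lemma pv_pairs_eq (L : Int) : ∀ (x : Int × Int) (rest : List (Int × Int)),
    ((List.range rest.length).map
        (fun k => (((x :: rest).getD k (0, 0)).2, ((x :: rest).getD (k + 1) (0, 0)).1)))
      ++ [(((x :: rest).getLast (by simp)).2, L)]
    = pvW L x rest := by
  intro x rest
  induction rest generalizing x with
  | nil => simp [pvW]
  | cons y r ih =>
    have h := ih y
    simp only [List.length_cons, List.range_succ_eq_map, List.map_cons, List.map_map,
      Function.comp_def, List.getD_cons_succ, List.getD_cons_zero, List.cons_append, pvW]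
    rw [← h]
    simp [List.getLast_cons]

-- B's backward fold builds the reverse of the reference form, carrying the first start.
lemma pv_fold_eq (n : Int) : ∀ (x : Int × Int) (rest : List (Int × Int)) (out0 : List (Int × Int)),
    ((x :: rest).reverse).foldl
      (fun (p : List (Int × Int) × Int) w => (p.1 ++ [(w.2, p.2)], w.1)) (out0, n)
    = (out0 ++ (pvW n x rest).reverse, x.1) := by
  intro x rest
  induction rest generalizing x with
  | nil => intro out0; simp [pvW]
  | cons y r ih =>
    intro out0
    have : (x :: y :: r).reverse = (y :: r).reverse ++ [x] := by simp
    rw [this, List.foldl_append, ih y out0]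
    simp [pvW]

-- ===== VERDICT (by name: the statement is the Claim_ definition above) =====
theorem extract_maintenance_windows_spec : Claim_equal_extract_maintenance_windows := by
  intro actions buffer_windows _
  unfold Spec_extract_maintenance_windows extract_maintenance_windows extract_maintenance_windows_alt
  cases buffer_windows with
  | nil => simp
  | cons x rest =>
    simp only [if_neg (List.cons_ne_nil x rest)]
    rw [pv_fold_eq (actions.length : Int) x rest []]
    simp only [List.nil_append, List.reverse_eq_nil_iff,
      if_neg (pvW_ne_nil (actions.length : Int) x rest), List.reverse_reverse]
    rw [PySem.List.foldl_append_singleton_eq_map]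
    have hlen : ((x :: rest).length : Int) - 1 = ((rest.length : Nat) : Int) := by simp
    rw [hlen, PySem.List.pyRange_zero_natCast, List.map_map]
    have hlast : PySem.List.pyGetD (x :: rest) (-1) (0, 0)
        = (x :: rest).getLast (List.cons_ne_nil x rest) :=
      PySem.List.pyGetD_neg_one (x :: rest) (0, 0) (List.cons_ne_nil x rest)
    rw [hlast]
    rw [← pv_pairs_eq ((actions.length : Int)) x rest]
    congr 1
    apply List.map_congr_left
    intro k hk
    simp only [Function.comp]
    have h1 : PySem.List.pyGetD (x :: rest) ((k : Int)) (0, 0) = (x :: rest).getD k (0, 0) :=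
      PySem.List.pyGetD_natCast ..
    have h2 : PySem.List.pyGetD (x :: rest) ((k : Int) + 1) (0, 0) = (x :: rest).getD (k + 1) (0, 0) := by
      have : ((k : Int) + 1) = (((k + 1 : Nat)) : Int) := by push_cast; ring
      rw [this]; exact PySem.List.pyGetD_natCast ..
    rw [h1, h2]
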